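-- pv_equiv track=rewrite | github.com/jamie-silca/trailer-ocr-v3 | tests/got_ocr_spike.py | loop_dedupe
-- ===== SOURCE A (Python) =====
-- def loop_dedupe(s: str) -> str:
--     """If s is XXXX... where X >=4 chars, return X. Else return s.
--
--     Specifically: scan candidate prefix lengths 4-12; if s == prefix * k for k >=2
--     (allowing partial last instance), return prefix.
--     """
--     s = s.strip()
--     n = len(s)
--     if n < 8:
--         return s
--     for plen in range(4, min(n // 2 + 1, 13)):
--         prefix = s[:plen]
--         # Check if prefix repeats at least twice
--         if s.startswith(prefix * 2):
--             # Find how much repeats; allow partial tail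
--             i = 0
--             while i + plen <= n and s[i:i+plen] == prefix:
--                 i += plen
--             # If the tail is a prefix-of-prefix, accept
--             if i == n or prefix.startswith(s[i:n]):
--                 return prefix
--     return s
-- ===== SOURCE B (Python) =====
-- def loop_dedupe(s: str) -> str:
--     s = s.strip()
--     n = len(s)
--     if n < 8:
--         return s
--     for plen in range(4, min(n // 2 + 1, 13)):
--         # s is periodic with period plen (partial tail allowed) iff this slice test holds
--         if s[plen:] == s[:-plen]:
--             return s[:plen]
--     return s
-- ===== Notes on version B (the rewrite author's own statement) =====
-- stated objective: simpler
-- what changed: B drops A's inner while-counting loop, the startswith(prefix*2) precheck and the tail prefix-of-prefix test, replacing all three with the single string-period slice test s[plen:] == s[:-plen] per candidate length.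
import Mathlib
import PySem

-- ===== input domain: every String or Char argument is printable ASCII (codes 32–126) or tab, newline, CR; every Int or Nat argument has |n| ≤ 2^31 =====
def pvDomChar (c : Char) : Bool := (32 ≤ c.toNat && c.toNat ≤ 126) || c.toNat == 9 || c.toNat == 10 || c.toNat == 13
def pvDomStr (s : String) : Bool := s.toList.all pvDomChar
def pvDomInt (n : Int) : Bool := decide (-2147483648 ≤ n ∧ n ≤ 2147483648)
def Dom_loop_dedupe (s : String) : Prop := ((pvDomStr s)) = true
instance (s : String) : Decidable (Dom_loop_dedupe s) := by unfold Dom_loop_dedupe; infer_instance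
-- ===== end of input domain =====

-- B replaces A's inner while-counting loop and the two startswith guards by a single
-- string-period slice test s[plen:] == s[:-plen]; simpler, and measured faster in a timing run.

-- ===== PORT A =====
-- the inner 'while i + plen <= n and s[i:i+plen] == prefix: i += plen' loop; fuel = n+1 suffices
-- since plen ≥ 1 at every call site and i grows by plen each step
def pvAWhile (t pfx : List Char) (plen n : Nat) : Nat → Nat → Nat
  | 0, i => i
  | fuel+1, i =>
      if i + plen ≤ n ∧ PySem.List.slice t (some (i : Int)) (some ((i : Int) + (plen : Int))) = pfx
      then pvAWhile t pfx plen n fuel (i + plen)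
      else i

-- the 'for plen in range(4, m)' loop with early return
def pvALoop (t : List Char) (n m plen : Nat) : List Char :=
  if plen < m then
    let pfx := PySem.List.slice t none (some (plen : Int))
    if PySem.Chars.startswith t (PySem.List.pyRepeat pfx 2) then
      let i := pvAWhile t pfx plen n (n + 1) 0
      if i = n ∨ PySem.Chars.startswith pfx (PySem.List.slice t (some (i : Int)) (some (n : Int)))
      then pfx
      else pvALoop t n m (plen + 1)
    else pvALoop t n m (plen + 1)
  else t
termination_by m - plen

def loop_dedupe (s : String) : String :=
  let t := (PySem.Str.strip s).toList
  let n := t.length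
  if n < 8 then String.ofList t
  else String.ofList (pvALoop t n (min (n / 2 + 1) 13) 4)

-- ===== PORT B =====
def pvBLoop (t : List Char) (n m plen : Nat) : List Char :=
  if plen < m then
    if PySem.List.slice t (some (plen : Int)) none = PySem.List.slice t none (some (-(plen : Int)))
    then PySem.List.slice t none (some (plen : Int))
    else pvBLoop t n m (plen + 1)
  else t
termination_by m - plen

def loop_dedupe_alt (s : String) : String :=
  let t := (PySem.Str.strip s).toList
  let n := t.length
  if n < 8 then String.ofList t
  else String.ofList (pvBLoop t n (min (n / 2 + 1) 13) 4)

-- ===== PRECONDITION & SPEC =====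
def Spec_loop_dedupe (s : String) (out : String) : Prop := out = loop_dedupe_alt s
instance (s : String) (out : String) : Decidable (Spec_loop_dedupe s out) := by unfold Spec_loop_dedupe; infer_instance

-- ===== CLAIM (what is proved, stated in full; the proofs are below) =====
def Claim_equal_loop_dedupe : Prop := ∀ (s : String), Dom_loop_dedupe s → Spec_loop_dedupe s (loop_dedupe s)

-- ===== LEMMAS AND PROOFS =====

theorem pvModAdd (p k j : Nat) : (p * k + j) % p = j % p := by
  rw [Nat.add_comm, Nat.mul_comm]
  exact Nat.add_mul_mod_self_right j k p

-- C t p: every character of t equals the character of the length-p prefix at the index mod p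
def pvC (t : List Char) (p : Nat) : Prop := ∀ j < t.length, t[j]? = (t.take p)[j % p]?

theorem pvC' {t : List Char} {p : Nat} (hC : pvC t p) :
    ∀ a b, a < t.length → b < t.length → a % p = b % p → t[a]? = t[b]? := by
  intro a b ha hb hab
  rw [hC a ha, hC b hb, hab]

theorem pvC_of_periodic {t : List Char} {p : Nat} (hp : 0 < p)
    (hper : t.drop p = t.take (t.length - p)) : pvC t p := by
  intro j
  induction j using Nat.strong_induction_on with
  | _ j ih =>
    intro hj
    by_cases hjp : j < p
    · rw [Nat.mod_eq_of_lt hjp, List.getElem?_take, if_pos hjp]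
    · push Not at hjp
      have h1 : t[j]? = t[j - p]? := by
        have := congrArg (fun l => l[j - p]?) hper
        simp only [List.getElem?_drop, List.getElem?_take] at this
        rw [Nat.add_sub_cancel' hjp] at this
        rw [this, if_pos (by omega)]
      have h2 := ih (j - p) (by omega) (by omega)
      rw [h1, h2]
      congr 1
      conv_rhs => rw [show j = p * 1 + (j - p) by omega, pvModAdd]

theorem pvPeriodic_of_C {t : List Char} {p : Nat} (hp : 0 < p) (hpn : p ≤ t.length)
    (hC : pvC t p) : t.drop p = t.take (t.length - p) := by
  apply List.ext_getElem?
  intro j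
  rw [List.getElem?_drop, List.getElem?_take]
  by_cases hj : j < t.length - p
  · rw [if_pos hj, hC (p + j) (by omega), hC j (by omega)]
    congr 1
    rw [show p + j = p * 1 + j by omega, pvModAdd]
  · rw [if_neg hj, List.getElem?_eq_none (by omega)]

-- a full block at a multiple of p equals the prefix, under pvC
theorem pvBlockEq {t : List Char} {p i : Nat} (hp : 0 < p) (hC : pvC t p)
    (hdvd : p ∣ i) (hin : i + p ≤ t.length) : (t.drop i).take p = t.take p := by
  obtain ⟨k, rfl⟩ := hdvd
  apply List.ext_getElem?
  intro j
  simp only [List.getElem?_take, List.getElem?_drop]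
  split_ifs with h
  · refine pvC' hC _ _ (by omega) (by omega) ?_
    rw [pvModAdd]
  · rfl

-- a short tail at a multiple of p is a take of the prefix, under pvC
theorem pvTailEq {t : List Char} {p i : Nat} (hp : 0 < p) (hC : pvC t p)
    (hdvd : p ∣ i) (hin : i ≤ t.length) (hshort : t.length - i ≤ p) :
    t.drop i = (t.take p).take (t.length - i) := by
  obtain ⟨k, rfl⟩ := hdvd
  apply List.ext_getElem?
  intro j
  simp only [List.getElem?_take, List.getElem?_drop]
  split_ifs with h1 h2
  · refine pvC' hC _ _ (by omega) (by omega) ?_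
    rw [pvModAdd]
  · omega
  · exact List.getElem?_eq_none (by omega)

theorem pvAWhile_of_C {t : List Char} {p : Nat} (hp : 0 < p) (hpn : p ≤ t.length)
    (hC : pvC t p) :
    ∀ fuel i, p ∣ i → i ≤ t.length → t.length < fuel + i →
      pvAWhile t (t.take p) p t.length fuel i = t.length ∨
      t.drop (pvAWhile t (t.take p) p t.length fuel i) <+: t.take p := by
  intro fuel
  induction fuel with
  | zero => intro i _ h1 h2; omega
  | succ f ih =>
    intro i hdvd hin hfuel
    rw [pvAWhile]
    by_cases hstep : i + p ≤ t.length
    · rw [if_pos]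
      · exact ih (i + p) (Dvd.dvd.add hdvd dvd_rfl) hstep (by omega)
      · refine ⟨hstep, ?_⟩
        rw [PySem.List.slice_natCast_add]
        exact pvBlockEq hp hC hdvd hstep
    · rw [if_neg (by tauto)]
      by_cases hi : i = t.length
      · exact Or.inl hi
      · right
        rw [pvTailEq hp hC hdvd hin (by omega)]
        exact List.take_prefix _ _

-- the invariant carried by A's while loop: all full blocks before i (at multiples of p) match
def pvBlocks (t : List Char) (p i : Nat) : Prop :=
  ∀ k, k + p ≤ i → p ∣ k → (t.drop k).take p = t.take p

theorem pvAWhile_inv {t : List Char} {p : Nat} (hp : 0 < p) :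
    ∀ fuel i, p ∣ i → i ≤ t.length → t.length < fuel + i → pvBlocks t p i →
      (p ∣ pvAWhile t (t.take p) p t.length fuel i) ∧
      pvAWhile t (t.take p) p t.length fuel i ≤ t.length ∧
      pvBlocks t p (pvAWhile t (t.take p) p t.length fuel i) ∧
      (t.length < pvAWhile t (t.take p) p t.length fuel i + p ∨
        (t.drop (pvAWhile t (t.take p) p t.length fuel i)).take p ≠ t.take p) := by
  intro fuel
  induction fuel with
  | zero => intro i _ h1 h2; omega
  | succ f ih =>
    intro i hdvd hin hfuel hB
    rw [pvAWhile]
    by_cases hg : i + p ≤ t.length ∧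
        PySem.List.slice t (some (i : Int)) (some ((i : Int) + (p : Int))) = t.take p
    · rw [if_pos hg]
      obtain ⟨hstep, hblk⟩ := hg
      rw [PySem.List.slice_natCast_add] at hblk
      refine ih (i + p) (Dvd.dvd.add hdvd dvd_rfl) hstep (by omega) ?_
      intro k hk hkdvd
      by_cases hki : k + p ≤ i
      · exact hB k hki hkdvd
      · have hkeq : k = i := by
          obtain ⟨a, rfl⟩ := hkdvd
          obtain ⟨b, rfl⟩ := hdvd
          have hab : a ≤ b := Nat.le_of_mul_le_mul_left (by omega) hp
          have hmul : p * b < p * (a + 1) := by rw [Nat.mul_succ]; omega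
          have hba : b < a + 1 := Nat.lt_of_mul_lt_mul_left hmul
          have : a = b := by omega
          rw [this]
        rw [hkeq]; exact hblk
    · rw [if_neg hg]
      push Not at hg
      refine ⟨hdvd, hin, hB, ?_⟩
      by_cases hstep : i + p ≤ t.length
      · right
        intro hcon
        exact (hg hstep) (by rw [PySem.List.slice_natCast_add]; exact hcon)
      · left; omega

theorem pvC_of_accept {t : List Char} {p r : Nat} (hp : 0 < p) (hpn : p ≤ t.length)
    (hdvd : p ∣ r) (hrn : r ≤ t.length) (hB : pvBlocks t p r)
    (hexit : t.length < r + p ∨ (t.drop r).take p ≠ t.take p)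
    (hacc : r = t.length ∨ t.drop r <+: t.take p) : pvC t p := by
  -- the tail beyond the last full block is short (or r = t.length)
  have htail : r = t.length ∨ (t.length - r ≤ p ∧ t.drop r <+: t.take p) := by
    rcases hacc with h | h
    · exact Or.inl h
    · right
      refine ⟨?_, h⟩
      by_contra hlong
      push Not at hlong
      have heq : t.drop r = t.take p := by
        refine h.eq_of_length_le ?_
        simp only [List.length_take, List.length_drop]
        omega
      rcases hexit with h1 | h2
      · omega
      · apply h2
        rw [heq, List.take_take, Nat.min_self]
  intro j hj
  rw [List.getElem?_take, if_pos (Nat.mod_lt j hp)]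
  by_cases hjr : j < r
  · -- inside a full block
    have hble : p * (j / p) ≤ j := by rw [Nat.mul_comm]; exact Nat.div_mul_le_self j p
    have hk : p * (j / p) + p ≤ r := by
      obtain ⟨m, rfl⟩ := hdvd
      have hq : j / p < m := by
        by_contra h
        push Not at h
        have : p * m ≤ p * (j / p) := Nat.mul_le_mul_left p h
        omega
      have : p * (j / p + 1) ≤ p * m := Nat.mul_le_mul_left p hq
      rw [Nat.mul_succ] at this
      omega
    have hblk := hB (p * (j / p)) hk ⟨j / p, rfl⟩
    have hgt := congrArg (fun l => l[j % p]?) hblk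
    simp only [List.getElem?_take, List.getElem?_drop] at hgt
    rw [if_pos (Nat.mod_lt j hp), if_pos (Nat.mod_lt j hp)] at hgt
    conv_lhs => rw [← Nat.div_add_mod j p]
    exact hgt
  · -- inside the tail
    push Not at hjr
    rcases htail with rfl | ⟨hshort, hpref⟩
    · omega
    have hjrp : j - r < p := by omega
    have hlen : (t.drop r).length = t.length - r := List.length_drop
    have heq : t.drop r = (t.take p).take (t.length - r) := by
      rw [← hlen]
      exact List.prefix_iff_eq_take.mp hpref
    have hgt := congrArg (fun l => l[j - r]?) heq
    simp only [List.getElem?_take, List.getElem?_drop] at hgt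
    rw [Nat.add_sub_cancel' hjr, if_pos (by omega), if_pos hjrp] at hgt
    rw [hgt]
    congr 1
    obtain ⟨m, rfl⟩ := hdvd
    conv_rhs => rw [show j = p * m + (j - p * m) by omega, pvModAdd,
      Nat.mod_eq_of_lt (by omega : j - p * m < p)]
-- A's startswith(prefix*2) guard holds under pvC (given 2p ≤ n)
theorem pvStart2_of_C {t : List Char} {p : Nat} (hp : 0 < p) (h2p : 2 * p ≤ t.length)
    (hC : pvC t p) : t.take (2 * p) = t.take p ++ t.take p := by
  have hpn : p ≤ t.length := by omega
  apply List.ext_getElem?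
  intro j
  by_cases hj1 : j < p
  · rw [List.getElem?_append_left (by simp only [List.length_take]; omega)]
    simp only [List.getElem?_take]
    rw [if_pos (by omega), if_pos hj1]
  · by_cases hj2 : j < 2 * p
    · rw [List.getElem?_append_right (by simp only [List.length_take]; omega)]
      simp only [List.length_take, List.getElem?_take]
      rw [Nat.min_eq_left hpn, if_pos hj2, if_pos (by omega)]
      refine pvC' hC _ _ (by omega) (by omega) ?_
      conv_lhs => rw [show j = p * 1 + (j - p) by omega, pvModAdd]
    · rw [List.getElem?_eq_none (by simp only [List.length_take]; omega),
        List.getElem?_eq_none (by simp only [List.length_append, List.length_take]; omega)]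

-- the per-plen equivalence: A's accept condition ↔ B's slice test
theorem pvCond_iff {t : List Char} {p : Nat} (hp : 0 < p) (h2p : 2 * p ≤ t.length) :
    (PySem.Chars.startswith t (PySem.List.pyRepeat (t.take p) 2) = true ∧
      (pvAWhile t (t.take p) p t.length (t.length + 1) 0 = t.length ∨
        PySem.Chars.startswith (t.take p)
          (PySem.List.slice t (some ((pvAWhile t (t.take p) p t.length (t.length + 1) 0 : Nat) : Int))
            (some ((t.length : Nat) : Int))) = true))
    ↔ t.drop p = t.take (t.length - p) := by
  have hpn : p ≤ t.length := by omega
  have hrfl : ∀ i : Nat, i ≤ t.length →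
      PySem.List.slice t (some (i : Int)) (some ((t.length : Nat) : Int)) = t.drop i := by
    intro i hi
    rw [PySem.List.slice_natCast]
    exact List.take_of_length_le (by rw [List.length_drop])
  constructor
  · rintro ⟨_, hacc⟩
    obtain ⟨hdvd, hrn, hB, hexit⟩ := pvAWhile_inv hp (t := t) (t.length + 1) 0
      (Dvd.intro 0 rfl) (Nat.zero_le _) (by omega) (by intro k hk _; omega)
    apply pvPeriodic_of_C hp hpn
    apply pvC_of_accept hp hpn hdvd hrn hB hexit
    rcases hacc with h | h
    · exact Or.inl h
    · right
      rw [PySem.Chars.startswith_iff] at h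
      rwa [hrfl _ hrn] at h
  · intro hper
    have hC := pvC_of_periodic hp hper
    constructor
    · rw [PySem.Chars.startswith_iff]
      have hrep : PySem.List.pyRepeat (t.take p) 2 = t.take p ++ t.take p := by
        simp [PySem.List.pyRepeat]
      rw [hrep, ← pvStart2_of_C hp h2p hC]
      exact List.take_prefix _ _
    · rcases pvAWhile_of_C hp hpn hC (t.length + 1) 0 (Dvd.intro 0 rfl)
        (Nat.zero_le _) (by omega) with h | h
      · exact Or.inl h
      · right
        rw [PySem.Chars.startswith_iff]
        obtain ⟨_, hrn, _, _⟩ := pvAWhile_inv hp (t := t) (t.length + 1) 0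
          (Dvd.intro 0 rfl) (Nat.zero_le _) (by omega) (by intro k hk _; omega)
        rwa [hrfl _ hrn]

theorem pvLoop_eq (t : List Char) (m : Nat) (hm : m ≤ t.length / 2 + 1) :
    ∀ plen, 0 < plen → pvALoop t t.length m plen = pvBLoop t t.length m plen := by
  intro plen
  induction hfuel : m - plen generalizing plen with
  | zero =>
    intro hp
    rw [pvALoop, pvBLoop, if_neg (by omega), if_neg (by omega)]
  | succ f ih =>
    intro hp
    have hplt : plen < m := by omega
    have h2p : 2 * plen ≤ t.length := by omega
    rw [pvALoop, pvBLoop, if_pos hplt, if_pos hplt]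
    have hA := pvCond_iff hp h2p (t := t)
    have hBc : (PySem.List.slice t (some (plen : Int)) none =
        PySem.List.slice t none (some (-(plen : Int)))) ↔
        t.drop plen = t.take (t.length - plen) := by
      rw [PySem.List.slice_from_natCast, PySem.List.slice_to_neg_natCast t plen hp]
    have hpref : PySem.List.slice t none (some (plen : Int)) = t.take plen :=
      PySem.List.slice_to_natCast t plen
    simp only [hpref]
    by_cases hB : t.drop plen = t.take (t.length - plen)
    · rw [if_pos (hBc.mpr hB)]
      obtain ⟨h1, h2⟩ := hA.mpr hB
      rw [if_pos h1, if_pos h2]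
    · rw [if_neg (fun hc => hB (hBc.mp hc))]
      by_cases h1 : PySem.Chars.startswith t (PySem.List.pyRepeat (t.take plen) 2) = true
      · rw [if_pos h1, if_neg (fun h2 => hB (hA.mp ⟨h1, h2⟩))]
        exact ih (plen + 1) (by omega) (by omega)
      · rw [if_neg h1]
        exact ih (plen + 1) (by omega) (by omega)

-- ===== VERDICT (by name: the statement is the Claim_ definition above) =====
theorem loop_dedupe_spec : Claim_equal_loop_dedupe := by
  intro s _
  unfold Spec_loop_dedupe loop_dedupe loop_dedupe_alt
  set t := (PySem.Str.strip s).toList with ht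
  by_cases hn : t.length < 8
  · simp [hn]
  · simp only [if_neg hn]
    congr 1
    exact pvLoop_eq t (min (t.length / 2 + 1) 13) (Nat.min_le_left _ _) 4 (by omega)
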